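-- pv_equiv track=rewrite | github.com/alinmuraretu/alin1987 | alin1987/progbasics-python-game-inventory/gameInventory.py | get_max_column_widths
-- ===== SOURCE A (Python) =====
-- def get_max_column_widths(inventory):
--     max_name_width = None
--     max_count_width = None
--     for name, count in inventory.items():
--         name_width = len(name)
--         count_width = len(str(count))
--
--         if max_name_width == None or max_name_width < name_width:
--             max_name_width = name_width
--
--         if max_count_width == None or max_count_width < count_width:
--             max_count_width = count_width
--     return (max_name_width, max_count_width)
-- ===== SOURCE B (Python) =====
-- def get_max_column_widths(inventory):
--     if not inventory:
--         return (None, None)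
--     return (sorted(len(name) for name in inventory)[-1],
--             sorted(len(str(count)) for count in inventory.values())[-1])
-- ===== Notes on version B (the rewrite author's own statement) =====
-- stated objective: alternative
-- what changed: Replaces the fused running-max loop over two optional accumulators with a sort-then-take-last strategy: each column's widths are materialised, sorted, and the last (largest) element taken, with an explicit empty-dict early return for (None, None).
import Mathlib
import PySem

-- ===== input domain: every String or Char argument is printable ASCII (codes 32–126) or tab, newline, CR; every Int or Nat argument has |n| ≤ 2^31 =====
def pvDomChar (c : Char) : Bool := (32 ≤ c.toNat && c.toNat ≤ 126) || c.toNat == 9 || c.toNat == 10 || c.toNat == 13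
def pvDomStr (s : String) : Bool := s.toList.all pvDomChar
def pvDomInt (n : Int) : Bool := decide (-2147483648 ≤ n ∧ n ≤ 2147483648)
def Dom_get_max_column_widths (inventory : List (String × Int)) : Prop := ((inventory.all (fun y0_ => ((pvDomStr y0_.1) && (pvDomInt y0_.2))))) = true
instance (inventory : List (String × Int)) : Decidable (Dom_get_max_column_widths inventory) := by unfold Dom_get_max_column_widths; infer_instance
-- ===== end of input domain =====

-- B finds each column's maximum width by sorting the list of widths and taking the
-- last element (with an explicit empty-input early return), instead of A's fused
-- loop with two optional running maxima. Equivalence of RETURN values only.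


-- ===== PORT A =====
-- one fused loop over the items, two optional running maxima updated in place
def pvUpdA (o : Option Int) (x : Int) : Option Int :=
  match o with
  | none => some x
  | some m => if m < x then some x else some m

def get_max_column_widths (inventory : List (String × Int)) : Option Int × Option Int :=
  inventory.foldl
    (fun (st : Option Int × Option Int) p =>
      let name_width := PySem.Str.len p.1
      let count_width := PySem.Str.len (PySem.Int.toStr p.2)
      (pvUpdA st.1 name_width, pvUpdA st.2 count_width))
    (none, none)

-- ===== PORT B =====
-- empty dict → (None, None); otherwise sort each column's widths and take [-1]
def get_max_column_widths_alt (inventory : List (String × Int)) : Option Int × Option Int :=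
  if inventory = [] then (none, none)
  else
    (PySem.List.pyGet? (PySem.List.sorted (inventory.map (fun p => PySem.Str.len p.1)) (fun x => x) false) (-1),
     PySem.List.pyGet? (PySem.List.sorted (inventory.map (fun p => PySem.Str.len (PySem.Int.toStr p.2))) (fun x => x) false) (-1))

-- ===== PRECONDITION & SPEC =====
def Spec_get_max_column_widths (inventory : List (String × Int)) (out : Option Int × Option Int) : Prop := out = get_max_column_widths_alt inventory
instance (inventory : List (String × Int)) (out : Option Int × Option Int) : Decidable (Spec_get_max_column_widths inventory out) := by unfold Spec_get_max_column_widths; infer_instance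

-- ===== CLAIM =====
def Claim_equal_get_max_column_widths : Prop := ∀ (inventory : List (String × Int)), Dom_get_max_column_widths inventory → Spec_get_max_column_widths inventory (get_max_column_widths inventory)

-- ===== LEMMAS AND PROOFS =====
theorem pvUpdA_some (a x : Int) : pvUpdA (some a) x = some (max a x) := by
  simp only [pvUpdA, max_def]
  split_ifs with h1 h2 <;> (try rfl) <;> (exact congrArg some (by omega))

theorem fused_fold_eq (l : List (String × Int)) (a b : Int) :
    l.foldl
      (fun (st : Option Int × Option Int) p =>
        (pvUpdA st.1 (PySem.Str.len p.1), pvUpdA st.2 (PySem.Str.len (PySem.Int.toStr p.2))))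
      (some a, some b)
    = (some ((l.map (fun p => PySem.Str.len p.1)).foldl max a),
       some ((l.map (fun p => PySem.Str.len (PySem.Int.toStr p.2))).foldl max b)) := by
  induction l generalizing a b with
  | nil => simp
  | cons x t ih =>
      simp only [List.foldl_cons, List.map_cons, pvUpdA_some]
      exact ih _ _

-- the last element of a ≤-sorted nonempty list is an upper bound of its members
theorem getLast_isMax (s : List Int) (h : s ≠ []) (hp : s.Pairwise (· ≤ ·)) :
    ∀ b ∈ s, b ≤ s.getLast h := by
  intro b hb
  obtain ⟨i, hi, rfl⟩ := List.getElem_of_mem hb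
  rw [List.getLast_eq_getElem]
  rcases Nat.lt_or_ge i (s.length - 1) with hlt | hge
  · exact (List.pairwise_iff_getElem.mp hp) i (s.length - 1) hi (by omega) hlt
  · have : i = s.length - 1 := by omega
    simp [this]

-- sorted-then-last computes the running maximum of the unsorted list
theorem sorted_last_eq_foldl_max (x : Int) (t : List Int) :
    PySem.List.pyGet? (PySem.List.sorted (x :: t) (fun y => y) false) (-1)
      = some (t.foldl max x) := by
  set s := PySem.List.sorted (x :: t) (fun y => y) false with hs
  have hperm : s.Perm (x :: t) := PySem.List.sorted_perm _ _ _
  have hne : s ≠ [] := by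
    intro h0
    have := hperm.length_eq
    simp [h0] at this
  rw [PySem.List.pyGet?_neg_one, List.getLast?_eq_some_getLast hne]
  congr 1
  have hp : s.Pairwise (fun a b => a ≤ b) := PySem.List.sorted_pairwise (x :: t) (fun y => y)
  have hmax : (x :: t).max? = some (t.foldl max x) := rfl
  have hmem : s.getLast hne ∈ x :: t := hperm.mem_iff.mp (List.getLast_mem hne)
  have hub : ∀ b ∈ x :: t, b ≤ s.getLast hne := by
    intro b hb
    exact getLast_isMax s hne hp b (hperm.mem_iff.mpr hb)
  have := List.max?_eq_some_iff.mp hmax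
  -- both are the maximum of x :: t, hence equal
  have h1 : t.foldl max x ≤ s.getLast hne := hub _ this.1
  have h2 : s.getLast hne ≤ t.foldl max x := this.2 _ hmem
  omega

-- ===== VERDICT =====
theorem get_max_column_widths_spec : Claim_equal_get_max_column_widths := by
  intro inventory _
  unfold Spec_get_max_column_widths get_max_column_widths get_max_column_widths_alt
  cases inventory with
  | nil => simp
  | cons x t =>
      simp only [if_neg (List.cons_ne_nil x t), List.foldl_cons, List.map_cons, show ∀ x, pvUpdA none x = some x from fun _ => rfl]
      rw [fused_fold_eq, sorted_last_eq_foldl_max, sorted_last_eq_foldl_max]
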